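-- pv_equiv track=rewrite | github.com/kingbj940429/kim-lee-kwon | programmers/kakao/lv2/[3차] 방금그곡/kbj.py | get_music_arr
-- ===== SOURCE A (Python) =====
-- def get_music_arr(musicString, time):
--     result = []
--     for c in musicString:
--         if c == '#':
--             result[-1] += '#'
--         else:
--             result.append(c)
--     if time == 0:
--         return result
--     if len(result) >= time:
--         return result[:time]
--     result = result * (time // len(result)) + result[:time % len(result)]
--     return result
-- ===== SOURCE B (Python) =====
-- def get_music_arr(musicString, time):
--     # Parse by scanning from the right, attaching pending '#'s to the note before them.
--     notes = []
--     pending = ''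
--     for c in reversed(musicString):
--         if c == '#':
--             pending = '#' + pending
--         else:
--             notes.append(c + pending)
--             pending = ''
--     notes.reverse()
--     if time == 0:
--         return notes
--     out = list(notes)
--     while len(out) < time:
--         out.extend(notes)
--     return out[:time]
-- ===== Notes on version B (the rewrite author's own statement) =====
-- stated objective: alternative
-- what changed: The parse is done by a right-to-left scan that keeps a pending run of '#'s and attaches it to the note character that precedes it (instead of mutating the last element of a growing list), and the tiling is done by iteratively extending the output until it reaches the requested length and slicing once (instead of the closed-form list-multiplication plus remainder slice).
import Mathlib
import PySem

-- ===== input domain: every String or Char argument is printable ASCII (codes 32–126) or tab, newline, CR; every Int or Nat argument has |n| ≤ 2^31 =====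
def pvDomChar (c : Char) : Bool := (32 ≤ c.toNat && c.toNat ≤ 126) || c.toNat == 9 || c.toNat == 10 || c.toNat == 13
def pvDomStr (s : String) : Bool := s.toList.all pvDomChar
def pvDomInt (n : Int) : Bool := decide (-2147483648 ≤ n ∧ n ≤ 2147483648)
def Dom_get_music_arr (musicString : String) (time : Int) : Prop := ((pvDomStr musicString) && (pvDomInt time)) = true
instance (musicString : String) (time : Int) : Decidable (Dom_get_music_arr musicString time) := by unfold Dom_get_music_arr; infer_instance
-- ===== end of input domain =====

-- B re-implements the parse as a right-to-left scan with a pending '#'-run and the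
-- tiling as extend-until-long-enough plus one slice; alternative decomposition, same cost.

-- ===== PORT A =====
-- Python strings are handled as List Char (per PySem convention) and converted with
-- String.mk at the return; 'result[-1] += "#"' on an empty result raises IndexError in
-- Python (excluded by Pre_), the helper returns [] there.
def sharpLastA : List (List Char) → List (List Char)
  | [] => []
  | [x] => [x ++ ['#']]
  | x :: y :: t => x :: sharpLastA (y :: t)

def stepA (res : List (List Char)) (c : Char) : List (List Char) :=
  if c = '#' then sharpLastA res else res ++ [[c]]

-- Python 'xs * k' (empty for k ≤ 0)
def pyListRep (xs : List (List Char)) : Nat → List (List Char)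
  | 0 => []
  | Nat.succ n => xs ++ pyListRep xs n

def get_music_arr (musicString : String) (time : Int) : List String :=
  let result := musicString.toList.foldl stepA []
  let result' :=
    if time = 0 then result
    else if time ≤ (result.length : Int) then PySem.List.slice result none (some time)
    else pyListRep result (PySem.Int.floordiv time (result.length : Int)).toNat ++
         PySem.List.slice result none (some (PySem.Int.mod time (result.length : Int)))
  result'.map (fun g => String.ofList g)

-- ===== PORT B =====
-- state: (notes so far, pending run of '#'s); iterates over reversed(musicString)
def stepB (st : List (List Char) × List Char) (c : Char) : List (List Char) × List Char :=
  if c = '#' then (st.1, '#' :: st.2) else (st.1 ++ [c :: st.2], [])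

-- the 'while len(out) < time: out.extend(notes)' loop; fuel = time.toNat always suffices
-- when notes ≠ [] (each pass grows out), and the loop is unreachable otherwise under Pre_.
def extendLoop (time : Int) (notes : List (List Char)) : Nat → List (List Char) → List (List Char)
  | 0, out => out
  | Nat.succ f, out => if (out.length : Int) < time then extendLoop time notes f (out ++ notes) else out

def get_music_arr_alt (musicString : String) (time : Int) : List String :=
  let p := musicString.toList.reverse.foldl stepB ([], [])
  let notes := p.1.reverse
  let result :=
    if time = 0 then notes
    else PySem.List.slice (extendLoop time notes time.toNat notes) none (some time)
  result.map (fun g => String.ofList g)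

-- ===== PRECONDITION & SPEC =====
-- Pre_ excludes exactly the inputs where A raises: a leading '#' (IndexError on
-- result[-1]) and an empty note list with time > 0 (ZeroDivisionError in time % 0).
def Pre_get_music_arr (musicString : String) (time : Int) : Prop :=
  musicString.toList.head? ≠ some '#' ∧ (musicString.toList = [] → time ≤ 0)
instance (musicString : String) (time : Int) : Decidable (Pre_get_music_arr musicString time) := by
  unfold Pre_get_music_arr; infer_instance

def pvWitness_get_music_arr : String × Int := ("CDE#FG", 11)

def Spec_get_music_arr (musicString : String) (time : Int) (out : List String) : Prop := out = get_music_arr_alt musicString time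
instance (musicString : String) (time : Int) (out : List String) : Decidable (Spec_get_music_arr musicString time out) := by unfold Spec_get_music_arr; infer_instance

-- ===== CLAIM (what is proved, stated in full; the proofs are below) =====
def Claim_equal_get_music_arr : Prop := ∀ (musicString : String) (time : Int), Dom_get_music_arr musicString time → Pre_get_music_arr musicString time → Spec_get_music_arr musicString time (get_music_arr musicString time)

-- ===== LEMMAS AND PROOFS =====

-- reference grouping: each group is a non-'#' character followed by its run of '#'s
def parseRef : List Char → List (List Char)
  | [] => []
  | c :: s => (c :: s.takeWhile (· == '#')) :: parseRef (s.dropWhile (· == '#'))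
termination_by l => l.length
decreasing_by
  have := List.length_dropWhile_le (· == '#') s
  simp; omega

theorem parseRef_ne_nil {s : List Char} (h : s ≠ []) : parseRef s ≠ [] := by
  cases s with
  | nil => exact absurd rfl h
  | cons c t => simp [parseRef]

theorem parseB_spec (s : List Char) :
    (s.reverse.foldl stepB ([], [])).1 = (parseRef (s.dropWhile (· == '#'))).reverse ∧
    (s.reverse.foldl stepB ([], [])).2 = s.takeWhile (· == '#') := by
  induction s with
  | nil => simp [parseRef]
  | cons c t ih =>
    rw [List.reverse_cons, List.foldl_append]
    by_cases hc : c = '#'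
    · subst hc
      simp only [List.foldl_cons, List.foldl_nil, stepB]
      refine ⟨?_, ?_⟩
      · rw [ih.1]; simp
      · rw [ih.2]; simp
    · simp only [List.foldl_cons, List.foldl_nil, stepB, if_neg hc]
      refine ⟨?_, ?_⟩
      · rw [ih.1, ih.2]
        rw [List.dropWhile_cons_of_neg (by simpa using hc), parseRef]
        simp
      · rw [List.takeWhile_cons_of_neg (by simpa using hc)]

theorem length_take_drop_while (t : List Char) :
    (List.takeWhile (· == '#') t).length + (List.dropWhile (· == '#') t).length = t.length := by
  have hsplit : List.takeWhile (· == '#') t ++ List.dropWhile (· == '#') t = t :=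
    List.takeWhile_append_dropWhile
  have := congrArg List.length hsplit
  rwa [List.length_append] at this

theorem parseRef_cons (d : Char) (t : List Char) :
    parseRef (d :: t) = (d :: t.takeWhile (· == '#')) :: parseRef (t.dropWhile (· == '#')) := by
  rw [parseRef]

theorem parseRef_append_nonsharp (c : Char) (hc : ¬ c = '#') (s : List Char) :
    parseRef (s ++ [c]) = parseRef s ++ [[c]] := by
  have hc' : (c == '#') = false := by simpa using hc
  fun_induction parseRef s with
  | case1 =>
    rw [List.nil_append, parseRef_cons]
    simp [parseRef, List.takeWhile, List.dropWhile, hc']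
  | case2 d t ih =>
    simp only [List.cons_append, parseRef_cons]
    rw [List.takeWhile_append, List.dropWhile_append]
    by_cases hfull : (List.dropWhile (· == '#') t).isEmpty = true
    · have hd : List.dropWhile (· == '#') t = [] := by simpa [List.isEmpty_iff] using hfull
      have ht : List.takeWhile (· == '#') t = t := by
        have hsplit : List.takeWhile (· == '#') t ++ List.dropWhile (· == '#') t = t :=
          List.takeWhile_append_dropWhile
        rwa [hd, List.append_nil] at hsplit
      rw [if_pos hfull, if_pos (by rw [ht])]
      simp [parseRef, List.takeWhile, List.dropWhile, hc', hd, ht]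
    · have hd : List.dropWhile (· == '#') t ≠ [] := by simpa [List.isEmpty_iff] using hfull
      have ht : (List.takeWhile (· == '#') t).length ≠ t.length := by
        intro h
        have := length_take_drop_while t
        exact hd (List.eq_nil_of_length_eq_zero (by omega))
      rw [if_neg hfull, if_neg ht, ih]

theorem sharpLastA_cons {x : List Char} {ys : List (List Char)} (h : ys ≠ []) :
    sharpLastA (x :: ys) = x :: sharpLastA ys := by
  cases ys with
  | nil => exact absurd rfl h
  | cons y t => rfl

theorem parseRef_append_sharp (s : List Char) (hs : s ≠ []) :
    parseRef (s ++ ['#']) = sharpLastA (parseRef s) := by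
  fun_induction parseRef s with
  | case1 => exact absurd rfl hs
  | case2 d t ih =>
    simp only [List.cons_append, parseRef_cons]
    rw [List.takeWhile_append, List.dropWhile_append]
    by_cases hfull : (List.dropWhile (· == '#') t).isEmpty = true
    · have hd : List.dropWhile (· == '#') t = [] := by simpa [List.isEmpty_iff] using hfull
      have ht : List.takeWhile (· == '#') t = t := by
        have hsplit : List.takeWhile (· == '#') t ++ List.dropWhile (· == '#') t = t :=
          List.takeWhile_append_dropWhile
        rwa [hd, List.append_nil] at hsplit
      rw [if_pos hfull, if_pos (by rw [ht])]
      simp [parseRef, List.takeWhile, List.dropWhile, hd, ht, sharpLastA]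
    · have hd : List.dropWhile (· == '#') t ≠ [] := by simpa [List.isEmpty_iff] using hfull
      have ht : (List.takeWhile (· == '#') t).length ≠ t.length := by
        intro h
        have := length_take_drop_while t
        exact hd (List.eq_nil_of_length_eq_zero (by omega))
      rw [if_neg hfull, if_neg ht, ih hd, sharpLastA_cons (parseRef_ne_nil hd)]

theorem parseA_spec (s : List Char) (h : s.head? ≠ some '#') :
    s.foldl stepA [] = parseRef s := by
  induction s using List.reverseRecOn with
  | nil => simp [parseRef]
  | append_singleton t c ih =>
    rw [List.foldl_append, List.foldl_cons, List.foldl_nil]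
    cases t with
    | nil =>
      have hc : ¬ c = '#' := by simpa using h
      simp [stepA, hc, parseRef, List.takeWhile]
    | cons d t' =>
      have hd : (d :: t').head? ≠ some '#' := by simpa using h
      rw [ih hd]
      by_cases hc : c = '#'
      · subst hc
        rw [stepA, if_pos rfl, parseRef_append_sharp _ (by simp)]
      · rw [stepA, if_neg hc, parseRef_append_nonsharp c hc]

theorem dropWhile_of_head_ne (s : List Char) (h : s.head? ≠ some '#') :
    s.dropWhile (· == '#') = s := by
  cases s with
  | nil => rfl
  | cons c t =>
    have hc : ¬ c = '#' := by simpa using h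
    rw [List.dropWhile_cons_of_neg (by simpa using hc)]

theorem pyListRep_length (xs : List (List Char)) (j : Nat) :
    (pyListRep xs j).length = j * xs.length := by
  induction j with
  | zero => simp [pyListRep]
  | succ j ih => simp [pyListRep, ih, Nat.succ_mul]; omega

theorem pyListRep_succ' (xs : List (List Char)) (j : Nat) :
    pyListRep xs (j + 1) = pyListRep xs j ++ xs := by
  induction j with
  | zero => simp [pyListRep]
  | succ j ih =>
    show xs ++ pyListRep xs (j + 1) = (xs ++ pyListRep xs j) ++ xs
    rw [ih, List.append_assoc]

theorem extendLoop_of_ge (time : Int) (notes out : List (List Char)) (fuel : Nat)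
    (h : ¬ ((out.length : Int) < time)) : extendLoop time notes fuel out = out := by
  cases fuel <;> simp [extendLoop, h]

theorem extendLoop_rep (time : Int) (notes : List (List Char)) (hn : notes ≠ []) :
    ∀ (fuel j : Nat), 1 ≤ j → time.toNat ≤ fuel + j * notes.length →
    ∃ m, extendLoop time notes fuel (pyListRep notes j) = pyListRep notes m ∧
      time.toNat ≤ m * notes.length ∧ 1 ≤ m := by
  have hn1 : 1 ≤ notes.length := List.length_pos_iff.mpr hn
  intro fuel
  induction fuel with
  | zero => intro j hj hle; exact ⟨j, rfl, by simpa using hle, hj⟩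
  | succ f ih =>
    intro j hj hle
    rw [extendLoop]
    by_cases h : ((pyListRep notes j).length : Int) < time
    · rw [if_pos h, ← pyListRep_succ']
      exact ih (j + 1) (by omega) (by
        have : f + (j + 1) * notes.length = f + j * notes.length + notes.length := by ring
        omega)
    · rw [if_neg h]
      refine ⟨j, rfl, ?_, hj⟩
      rw [pyListRep_length] at h
      omega

theorem take_rep (xs : List (List Char)) (hx : xs ≠ []) :
    ∀ (k r m : Nat), r < xs.length → k * xs.length + r ≤ m * xs.length →
    List.take (k * xs.length + r) (pyListRep xs m) = pyListRep xs k ++ List.take r xs := by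
  have hn1 : 1 ≤ xs.length := List.length_pos_iff.mpr hx
  intro k
  induction k with
  | zero =>
    intro r m hr hle
    simp only [Nat.zero_mul, Nat.zero_add, pyListRep, List.nil_append]
    cases m with
    | zero =>
      have hr0 : r = 0 := by omega
      subst hr0
      simp [pyListRep]
    | succ m' =>
      rw [pyListRep, List.take_append_of_le_length (Nat.le_of_lt hr)]
  | succ k' ih =>
    intro r m hr hle
    cases m with
    | zero =>
      exfalso
      simp only [Nat.zero_mul, Nat.le_zero, Nat.add_eq_zero_iff] at hle
      have := Nat.mul_eq_zero.mp hle.1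
      omega
    | succ m' =>
      have hsum : (k' + 1) * xs.length + r = xs.length + (k' * xs.length + r) := by ring
      rw [hsum, pyListRep, List.take_append, List.take_of_length_le (by omega),
        Nat.add_sub_cancel_left]
      rw [ih r m' hr (by
        have h1 : (k' + 1) * xs.length + r = xs.length + (k' * xs.length + r) := by ring
        have h2 : (m' + 1) * xs.length = xs.length + m' * xs.length := by ring
        omega)]
      rw [show pyListRep xs (k' + 1) = xs ++ pyListRep xs k' from rfl, List.append_assoc]

theorem get_music_arr_spec : Claim_equal_get_music_arr := by
  intro ms time hdom hpre
  unfold Spec_get_music_arr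
  obtain ⟨hhead, hempty⟩ := hpre
  simp only [get_music_arr, get_music_arr_alt]
  rw [parseA_spec ms.toList hhead, (parseB_spec ms.toList).1,
    dropWhile_of_head_ne ms.toList hhead, List.reverse_reverse]
  set notes := parseRef ms.toList with hnotes
  congr 1
  by_cases h0 : time = 0
  · rw [if_pos h0, if_pos h0]
  rw [if_neg h0, if_neg h0]
  by_cases hle : time ≤ (notes.length : Int)
  · rw [if_pos hle, extendLoop_of_ge time notes notes time.toNat (by omega)]
  rw [if_neg hle]
  -- time > len(notes); Pre_ forces notes ≠ []
  have hn : notes ≠ [] := by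
    intro hnil
    have hs : ms.toList = [] := by
      by_contra hne
      exact parseRef_ne_nil hne hnil
    have := hempty hs
    rw [hnil] at hle
    simp at hle
    omega
  have hn1 : 1 ≤ notes.length := List.length_pos_iff.mpr hn
  have hnpos : (0 : Int) < (notes.length : Int) := by exact_mod_cast hn1
  set k := PySem.Int.floordiv time (notes.length : Int) with hk
  set r := PySem.Int.mod time (notes.length : Int) with hr
  have hkr : k * (notes.length : Int) + r = time := by
    rw [hk, hr]; exact PySem.Int.floordiv_mul_add_mod time _
  have hrnn : 0 ≤ r := by rw [hr]; exact PySem.Int.mod_nonneg time hnpos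
  have hrlt : r < (notes.length : Int) := by rw [hr]; exact PySem.Int.mod_lt time hnpos
  have hk1 : 1 ≤ k := by
    rw [hk, PySem.Int.le_floordiv_iff_mul_le hnpos]
    omega
  set K := k.toNat with hK
  set R := r.toNat with hR
  have hkK : k = (K : Int) := (Int.toNat_of_nonneg (by omega)).symm
  have hrR : r = (R : Int) := (Int.toNat_of_nonneg hrnn).symm
  have hcast : ((K * notes.length + R : Nat) : Int) = ((time.toNat : Nat) : Int) := by
    push_cast
    rw [← hkK, ← hrR, Int.toNat_of_nonneg (by omega)]
    exact hkr
  have hN : time.toNat = K * notes.length + R := (Int.natCast_inj.mp hcast).symm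
  have hRlt : R < notes.length := by omega
  -- B's loop result: some repetition of notes that is long enough
  obtain ⟨m, hm, hmge, _⟩ := extendLoop_rep time notes hn time.toNat 1 (by omega) (by omega)
  have h1 : pyListRep notes 1 = notes := by simp [pyListRep]
  rw [h1] at hm
  rw [hm, hrR, PySem.List.slice_to _ (by omega), PySem.List.slice_to _ (by omega),
    Int.toNat_natCast, hN, take_rep notes hn K R m hRlt (by omega)]
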